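-- pv_equiv track=rewrite | github.com/monarch-initiative/dismech | src/dismech/g2p_compare.py | _classify_match_strength
-- ===== SOURCE A (Python) =====
-- from typing import Any
--
-- def _classify_match_strength(
--     genetic_matches: list[dict[str, Any]],
--     pathophysiology_matches: list[dict[str, Any]],
-- ) -> str:
--     if genetic_matches:
--         associations = [
--             str(match.get("association", "")).casefold() for match in genetic_matches
--         ]
--         if any("causative" in association for association in associations):
--             return "causative"
--         if any(
--             token in association
--             for association in associations
--             for token in ("subtype", "contiguous", "partner")
--         ):
--             return "subtype_specific"
--         return "secondary_genetic"
--     if pathophysiology_matches: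
--         return "pathophysiology_only"
--     raise ValueError("At least one genetic or pathophysiology match is required")
-- ===== SOURCE B (Python) =====
-- def _rank(match):
--     association = str(match.get("association", "")).casefold()
--     if "causative" in association:
--         return 2
--     if any(token in association for token in ("subtype", "contiguous", "partner")):
--         return 1
--     return 0
--
--
-- def _classify_match_strength(genetic_matches, pathophysiology_matches):
--     if not genetic_matches and not pathophysiology_matches:
--         raise ValueError("At least one genetic or pathophysiology match is required")
--     if not genetic_matches:
--         return "pathophysiology_only"
--     return ("secondary_genetic", "subtype_specific", "causative")[
--         max(_rank(match) for match in genetic_matches)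
--     ]
-- ===== Notes on version B (the rewrite author's own statement) =====
-- stated objective: alternative
-- what changed: Instead of building an associations list and running staged any() scans per keyword class, B maps every genetic match to a numeric severity rank (2=causative, 1=subtype tokens, 0=other), takes the max, and indexes a label table with it; the empty/pathophysiology guards are inverted to early raise.
import Mathlib
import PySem

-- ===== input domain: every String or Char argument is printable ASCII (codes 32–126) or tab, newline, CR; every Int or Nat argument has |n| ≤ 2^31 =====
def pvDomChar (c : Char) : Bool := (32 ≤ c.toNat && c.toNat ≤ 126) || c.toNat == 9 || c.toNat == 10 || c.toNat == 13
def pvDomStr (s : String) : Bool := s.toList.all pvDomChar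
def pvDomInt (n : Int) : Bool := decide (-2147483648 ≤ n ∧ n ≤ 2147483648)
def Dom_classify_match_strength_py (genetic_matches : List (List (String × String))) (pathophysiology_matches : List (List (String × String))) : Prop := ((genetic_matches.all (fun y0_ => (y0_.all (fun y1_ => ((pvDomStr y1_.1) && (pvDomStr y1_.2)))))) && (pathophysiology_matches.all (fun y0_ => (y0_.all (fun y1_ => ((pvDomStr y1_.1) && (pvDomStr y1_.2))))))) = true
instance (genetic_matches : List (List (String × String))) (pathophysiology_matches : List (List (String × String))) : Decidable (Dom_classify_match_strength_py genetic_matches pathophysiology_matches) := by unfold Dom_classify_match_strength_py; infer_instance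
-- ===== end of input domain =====

-- ===== PORT A =====
-- B replaces A's intermediate list plus staged any() keyword scans by a per-match numeric
-- severity rank reduced with max and a label table lookup (objective: alternative).
-- str(match.get("association","")).casefold(): on the ASCII domain casefold = lower; str() is the identity on strings
def pvAssoc (m : List (String × String)) : String :=
  PySem.Str.lower ((PySem.Dict.ofList m).getD "association" "")

def classify_match_strength_py (genetic_matches : List (List (String × String))) (pathophysiology_matches : List (List (String × String))) : String :=
  if !genetic_matches.isEmpty then
    let associations := genetic_matches.map pvAssoc
    if associations.any (fun a => PySem.Str.isIn "causative" a) then "causative"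
    else if associations.any (fun a =>
        ["subtype", "contiguous", "partner"].any (fun t => PySem.Str.isIn t a)) then "subtype_specific"
    else "secondary_genetic"
  else if !pathophysiology_matches.isEmpty then "pathophysiology_only"
  else ""  -- unreachable under Pre_ (Python raises ValueError here)

-- ===== PORT B =====
-- Source B's _rank: numeric severity of one match
def pvRank (m : List (String × String)) : Nat :=
  if PySem.Str.isIn "causative" (pvAssoc m) then 2
  else if ["subtype", "contiguous", "partner"].any (fun t => PySem.Str.isIn t (pvAssoc m)) then 1
  else 0

def classify_match_strength_py_alt (genetic_matches : List (List (String × String))) (pathophysiology_matches : List (List (String × String))) : String :=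
  if genetic_matches.isEmpty && pathophysiology_matches.isEmpty then ""  -- Python raises here; outside Pre_
  else if genetic_matches.isEmpty then "pathophysiology_only"
  else
    match PySem.List.max? (genetic_matches.map pvRank) (fun x => x) with
    | some r => (PySem.List.pyGet? ["secondary_genetic", "subtype_specific", "causative"] (r : Int)).getD ""
    | none => ""  -- unreachable: genetic_matches nonempty

-- ===== PRECONDITION & SPEC =====
-- A raises ValueError exactly when both lists are empty; Pre_ excludes only that input.
def Pre_classify_match_strength_py (genetic_matches : List (List (String × String))) (pathophysiology_matches : List (List (String × String))) : Prop :=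
  genetic_matches ≠ [] ∨ pathophysiology_matches ≠ []
instance (genetic_matches : List (List (String × String))) (pathophysiology_matches : List (List (String × String))) : Decidable (Pre_classify_match_strength_py genetic_matches pathophysiology_matches) := by unfold Pre_classify_match_strength_py; infer_instance

def pvWitness_classify_match_strength_py : (List (List (String × String))) × (List (List (String × String))) := ([[("association", "Causative")]], [])

def Spec_classify_match_strength_py (genetic_matches : List (List (String × String))) (pathophysiology_matches : List (List (String × String))) (out : String) : Prop := out = classify_match_strength_py_alt genetic_matches pathophysiology_matches
instance (genetic_matches : List (List (String × String))) (pathophysiology_matches : List (List (String × String))) (out : String) : Decidable (Spec_classify_match_strength_py genetic_matches pathophysiology_matches out) := by unfold Spec_classify_match_strength_py; infer_instance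

-- ===== CLAIM (what is proved, stated in full; the proofs are below) =====
def Claim_equal_classify_match_strength_py : Prop := ∀ (genetic_matches : List (List (String × String))) (pathophysiology_matches : List (List (String × String))), Dom_classify_match_strength_py genetic_matches pathophysiology_matches → Pre_classify_match_strength_py genetic_matches pathophysiology_matches → Spec_classify_match_strength_py genetic_matches pathophysiology_matches (classify_match_strength_py genetic_matches pathophysiology_matches)

-- ===== LEMMAS AND PROOFS =====

-- the rank A's staged scans would assign to a whole list
def pvMaxRank (l : List (List (String × String))) : Nat :=
  if l.any (fun m => PySem.Str.isIn "causative" (pvAssoc m)) then 2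
  else if l.any (fun m => ["subtype", "contiguous", "partner"].any (fun t => PySem.Str.isIn t (pvAssoc m))) then 1
  else 0

theorem pvMaxRank_cons (m : List (String × String)) (l : List (List (String × String))) :
    pvMaxRank (m :: l) = max (pvRank m) (pvMaxRank l) := by
  unfold pvMaxRank pvRank
  cases h1 : PySem.Str.isIn "causative" (pvAssoc m) <;>
    cases h2 : (["subtype", "contiguous", "partner"].any fun t => PySem.Str.isIn t (pvAssoc m)) <;>
      cases h3 : l.any (fun x => PySem.Str.isIn "causative" (pvAssoc x)) <;>
        cases h4 : (l.any fun x => ["subtype", "contiguous", "partner"].any fun t => PySem.Str.isIn t (pvAssoc x)) <;>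
          (simp only [List.any_cons, List.any_nil, Bool.or_false] at h2 h4 ⊢ <;>
            simp only [List.any_cons, h1, h2, h3, h4] <;> decide)

theorem pvFoldlMax (l : List (List (String × String))) (init : Nat) :
    (l.map pvRank).foldl max init = max init (pvMaxRank l) := by
  induction l generalizing init with
  | nil => simp [pvMaxRank]
  | cons m rest ih =>
    simp only [List.map_cons, List.foldl_cons, ih, pvMaxRank_cons]
    omega

theorem pvMax?_eq (m : List (String × String)) (l : List (List (String × String))) :
    PySem.List.max? ((m :: l).map pvRank) (fun x => x) = some (pvMaxRank (m :: l)) := by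
  simp only [List.map_cons, PySem.List.max?_id_cons, pvFoldlMax, pvMaxRank_cons]

-- ===== VERDICT (by name: the statement is the Claim_ definition above) =====
theorem classify_match_strength_py_spec : Claim_equal_classify_match_strength_py := by
  intro gm pm _ hpre
  unfold Spec_classify_match_strength_py classify_match_strength_py classify_match_strength_py_alt
  cases gm with
  | nil =>
    cases pm with
    | nil => exact absurd hpre (by simp [Pre_classify_match_strength_py])
    | cons q qs => rfl
  | cons m rest =>
    rw [pvMax?_eq]
    simp only [List.isEmpty_cons, Bool.not_false, if_true, Bool.false_and,
      Bool.false_eq_true, if_false, List.any_map, Function.comp_def]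
    unfold pvMaxRank
    cases hC : (m :: rest).any (fun x => PySem.Str.isIn "causative" (pvAssoc x)) <;>
      cases hT : ((m :: rest).any fun x => ["subtype", "contiguous", "partner"].any fun t => PySem.Str.isIn t (pvAssoc x)) <;>
        (try simp only [hC, hT]) <;> decide
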